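-- pv_equiv track=rewrite | github.com/shadowedqueens-maker/BiS-hunter | db_loader.py | _tokenize_row
-- ===== SOURCE A (Python) =====
-- def _tokenize_row(row_str):
--     """Parse a parenthesized SQL value tuple into a list of raw value strings.
--     Handles escaped quotes inside strings."""
--     values = []
--     current = []
--     in_string = False
--     i = 0
--     while i < len(row_str):
--         ch = row_str[i]
--         if in_string:
--             if ch == '\\' and i + 1 < len(row_str):
--                 current.append(ch)
--                 current.append(row_str[i + 1])
--                 i += 2
--                 continue
--             elif ch == "'":
--                 # Check for escaped '' (double single quote)
--                 if i + 1 < len(row_str) and row_str[i + 1] == "'":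
--                     current.append("''")
--                     i += 2
--                     continue
--                 else:
--                     in_string = False
--                     current.append(ch)
--             else:
--                 current.append(ch)
--         else:
--             if ch == "'":
--                 in_string = True
--                 current.append(ch)
--             elif ch == ',':
--                 values.append(''.join(current))
--                 current = []
--             else:
--                 current.append(ch)
--         i += 1
--     if current:
--         values.append(''.join(current))
--     return values
-- ===== SOURCE B (Python) =====
-- def _skip_string(s, i):
--     """Return the index just past the closing quote of a string literal
--     whose opening quote sits at index i-1 (or len(s) if unterminated)."""
--     n = len(s)
--     while i < n:
--         ch = s[i]
--         if ch == '\\' and i + 1 < n: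
--             i += 2
--         elif ch == "'":
--             if i + 1 < n and s[i + 1] == "'":
--                 i += 2
--             else:
--                 return i + 1
--         else:
--             i += 1
--     return i
--
--
-- def _split_top(s):
--     """Split s at the first top-level comma; recurse on the rest."""
--     i = 0
--     n = len(s)
--     while i < n:
--         ch = s[i]
--         if ch == ',':
--             return [s[:i]] + _split_top(s[i + 1:])
--         if ch == "'":
--             i = _skip_string(s, i + 1)
--         else:
--             i += 1
--     return [s]
--
--
-- def _tokenize_row(row_str):
--     segs = _split_top(row_str)
--     if segs[-1] == '':
--         segs.pop()
--     return segs
-- ===== Notes on version B (the rewrite author's own statement) =====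
-- stated objective: alternative
-- what changed: A's single char-by-char state machine that accumulates characters into a current buffer is replaced by a two-phase scheme: find the top-level comma positions by jumping over whole string literals with a skip-string helper, slice the input into substrings at those commas, and drop a trailing empty segment.
import Mathlib
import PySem

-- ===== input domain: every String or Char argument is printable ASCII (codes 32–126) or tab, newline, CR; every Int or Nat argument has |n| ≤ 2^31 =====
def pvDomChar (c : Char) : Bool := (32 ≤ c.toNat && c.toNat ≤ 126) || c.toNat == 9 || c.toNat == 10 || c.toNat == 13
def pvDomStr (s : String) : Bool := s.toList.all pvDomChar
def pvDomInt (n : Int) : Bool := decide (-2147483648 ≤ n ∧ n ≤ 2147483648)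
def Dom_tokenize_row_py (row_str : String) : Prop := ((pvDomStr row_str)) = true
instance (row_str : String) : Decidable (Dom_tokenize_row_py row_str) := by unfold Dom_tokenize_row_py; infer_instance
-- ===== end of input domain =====

-- B replaces A's char-by-char accumulator state machine with a two-phase scheme:
-- split the string at top-level commas (jumping over whole string literals), then
-- drop a trailing empty segment; same return value, objective: alternative.

-- ===== PORT A =====
-- the while loop of _tokenize_row, one step per iteration; cur is `current`, vals is `values`
def tokAgo : List Char → List Char → Bool → List String → List String
  | [], cur, _, vals => if cur = [] then vals else vals ++ [String.ofList cur]
  | ch :: rest, cur, false, vals =>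
      if ch = '\'' then tokAgo rest (cur ++ [ch]) true vals
      else if ch = ',' then tokAgo rest [] false (vals ++ [String.ofList cur])
      else tokAgo rest (cur ++ [ch]) false vals
  | '\\' :: c2 :: rest2, cur, true, vals => tokAgo rest2 (cur ++ ['\\', c2]) true vals
  | '\'' :: c2 :: rest2, cur, true, vals =>
      if c2 = '\'' then tokAgo rest2 (cur ++ ['\'', '\'']) true vals
      else tokAgo (c2 :: rest2) (cur ++ ['\'']) false vals
  | ['\''], cur, true, vals => tokAgo [] (cur ++ ['\'']) false vals
  | c :: rest, cur, true, vals => tokAgo rest (cur ++ [c]) true vals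

def tokenize_row_py (row_str : String) : List String :=
  tokAgo row_str.toList [] false []

-- ===== PORT B =====
-- _skip_string: number of characters consumed from just after an opening quote
-- through the closing quote (all of them if the string is unterminated)
def skipStr : List Char → Nat
  | [] => 0
  | '\\' :: _ :: rest => 2 + skipStr rest
  | '\'' :: '\'' :: rest => 2 + skipStr rest
  | '\'' :: _ => 1
  | _ :: rest => 1 + skipStr rest

-- index of the first top-level comma, if any (the while loop of _split_top)
def findCut : List Char → Option Nat
  | [] => none
  | ch :: rest =>
    if ch = ',' then some 0
    else if ch = '\'' then
      (findCut (rest.drop (skipStr rest))).map (fun j => j + 1 + skipStr rest)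
    else (findCut rest).map (· + 1)
termination_by cs => cs.length
decreasing_by all_goals (simp; try omega)

lemma findCut_lt {cs : List Char} {j : Nat} (h : findCut cs = some j) : j < cs.length := by
  fun_induction findCut cs generalizing j <;> simp_all
  · omega
  · next ih =>
      obtain ⟨j', hj', rfl⟩ := h
      have := ih hj'; simp at this; omega
  · next ih =>
      obtain ⟨j', hj', rfl⟩ := h
      have := ih hj'; omega

-- _split_top: slice at the first top-level comma and recurse
def splitTop (cs : List Char) : List (List Char) :=
  match h : findCut cs with
  | some j => cs.take j :: splitTop (cs.drop (j + 1))
  | none => [cs]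
termination_by cs.length
decreasing_by have := findCut_lt h; simp; omega

-- _tokenize_row: split, drop a trailing empty segment, return the strings
def tokenize_row_py_alt (row_str : String) : List String :=
  let segs := splitTop row_str.toList
  (if segs.getLast? = some ([] : List Char) then segs.dropLast else segs).map String.ofList

-- ===== PRECONDITION & SPEC =====
def Spec_tokenize_row_py (row_str : String) (out : List String) : Prop := out = tokenize_row_py_alt row_str
instance (row_str : String) (out : List String) : Decidable (Spec_tokenize_row_py row_str out) := by unfold Spec_tokenize_row_py; infer_instance

-- ===== CLAIM (what is proved, stated in full; the proofs are below) =====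
def Claim_equal_tokenize_row_py : Prop := ∀ (row_str : String), Dom_tokenize_row_py row_str → Spec_tokenize_row_py row_str (tokenize_row_py row_str)

-- ===== LEMMAS AND PROOFS =====

-- the post-processing of B, as a function of the segment list
def render (segs : List (List Char)) : List String :=
  (if segs.getLast? = some ([] : List Char) then segs.dropLast else segs).map String.ofList

-- prefix the first segment with cur
def mergeHead (cur : List Char) : List (List Char) → List (List Char)
  | [] => []
  | x :: xs => (cur ++ x) :: xs

lemma splitTop_some {cs : List Char} {j : Nat} (h : findCut cs = some j) :
    splitTop cs = cs.take j :: splitTop (cs.drop (j + 1)) := by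
  rw [splitTop.eq_def]; split <;> simp_all

lemma splitTop_none {cs : List Char} (h : findCut cs = none) : splitTop cs = [cs] := by
  rw [splitTop.eq_def]; split <;> simp_all

lemma splitTop_ne_nil (cs : List Char) : splitTop cs ≠ [] := by
  unfold splitTop; split <;> simp

lemma mergeHead_mergeHead (a b : List Char) (segs : List (List Char)) :
    mergeHead a (mergeHead b segs) = mergeHead (a ++ b) segs := by
  cases segs <;> simp [mergeHead]

lemma mergeHead_nil {segs : List (List Char)} (h : segs ≠ []) :
    mergeHead [] segs = segs := by
  cases segs <;> simp_all [mergeHead]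

lemma render_cons (x : List Char) {segs : List (List Char)} (h : segs ≠ []) :
    render (x :: segs) = String.ofList x :: render segs := by
  obtain ⟨y, ys, rfl⟩ := List.exists_cons_of_ne_nil h
  by_cases hl : (y :: ys).getLast? = some ([] : List Char) <;>
    simp [render, List.getLast?_cons_cons, hl]

lemma splitTop_comma (rest : List Char) : splitTop (',' :: rest) = [] :: splitTop rest := by
  have h : findCut (',' :: rest) = some 0 := by unfold findCut; simp
  rw [splitTop_some h]; simp

lemma splitTop_quote (rest : List Char) :
    splitTop ('\'' :: rest) =
      mergeHead ('\'' :: rest.take (skipStr rest)) (splitTop (rest.drop (skipStr rest))) := by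
  cases hrec : findCut (rest.drop (skipStr rest)) with
  | none =>
      have h : findCut ('\'' :: rest) = none := by unfold findCut; simp [hrec]
      rw [splitTop_none h, splitTop_none hrec]
      simp [mergeHead]
  | some j' =>
      have h : findCut ('\'' :: rest) = some (j' + 1 + skipStr rest) := by
        unfold findCut; simp [hrec]
      rw [splitTop_some h, splitTop_some hrec]
      simp [mergeHead]
      refine ⟨?_, ?_⟩
      · have ha : j' + 1 + skipStr rest = (skipStr rest + j') + 1 := by omega
        rw [ha, List.take_succ_cons, List.take_add]
      · rw [show j' + 1 + skipStr rest = skipStr rest + (j' + 1) from by omega]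

lemma splitTop_other {c : Char} (rest : List Char) (hc : c ≠ ',') (hq : c ≠ '\'') :
    splitTop (c :: rest) = mergeHead [c] (splitTop rest) := by
  cases hrec : findCut rest with
  | none =>
      have h : findCut (c :: rest) = none := by unfold findCut; simp [hc, hq, hrec]
      rw [splitTop_none h, splitTop_none hrec]
      simp [mergeHead]
  | some j' =>
      have h : findCut (c :: rest) = some (j' + 1) := by
        unfold findCut; simp [hc, hq, hrec]
      rw [splitTop_some h, splitTop_some hrec]
      simp [mergeHead, List.take_succ_cons, List.drop_succ_cons]

-- A's in-string state copies skipStr cs characters verbatim and leaves the string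
lemma tokAgo_inStr (cs : List Char) : ∀ (cur : List Char) (vals : List String),
    tokAgo cs cur true vals
      = tokAgo (cs.drop (skipStr cs)) (cur ++ cs.take (skipStr cs)) false vals := by
  fun_induction skipStr cs with
  | case1 => intro cur vals; simp [tokAgo]
  | case2 c2 rest ih =>
      intro cur vals
      rw [show tokAgo ('\\' :: c2 :: rest) cur true vals
            = tokAgo rest (cur ++ ['\\', c2]) true vals from by simp [tokAgo]]
      rw [ih]
      rw [show List.drop (2 + skipStr rest) ('\\' :: c2 :: rest)
            = List.drop (skipStr rest) rest from by
        rw [show 2 + skipStr rest = skipStr rest + 1 + 1 from by omega]; simp]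
      rw [show List.take (2 + skipStr rest) ('\\' :: c2 :: rest)
            = '\\' :: c2 :: List.take (skipStr rest) rest from by
        rw [show 2 + skipStr rest = skipStr rest + 1 + 1 from by omega]; simp]
      simp
  | case3 rest ih =>
      intro cur vals
      rw [show tokAgo ('\'' :: '\'' :: rest) cur true vals
            = tokAgo rest (cur ++ ['\'', '\'']) true vals from by simp [tokAgo]]
      rw [ih]
      rw [show List.drop (2 + skipStr rest) ('\'' :: '\'' :: rest)
            = List.drop (skipStr rest) rest from by
        rw [show 2 + skipStr rest = skipStr rest + 1 + 1 from by omega]; simp]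
      rw [show List.take (2 + skipStr rest) ('\'' :: '\'' :: rest)
            = '\'' :: '\'' :: List.take (skipStr rest) rest from by
        rw [show 2 + skipStr rest = skipStr rest + 1 + 1 from by omega]; simp]
      simp
  | case4 tail h =>
      intro cur vals
      cases tail with
      | nil => simp [tokAgo]
      | cons y ys =>
          have hy : y ≠ '\'' := fun hy => h ys (by rw [hy])
          rw [show tokAgo ('\'' :: y :: ys) cur true vals
                = tokAgo (y :: ys) (cur ++ ['\'']) false vals from by simp [tokAgo, hy]]
          simp
  | case5 c rest h1 h2 h3 ih =>
      intro cur vals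
      have hc2 : c ≠ '\'' := fun h => h3 h
      have hstep : tokAgo (c :: rest) cur true vals = tokAgo rest (cur ++ [c]) true vals := by
        cases rest with
        | nil => simp [tokAgo, hc2]
        | cons a b =>
            have hc1' : c ≠ '\\' := fun h => h1 a b h rfl
            simp [tokAgo, hc2]
      rw [hstep, ih]
      rw [show List.drop (1 + skipStr rest) (c :: rest) = List.drop (skipStr rest) rest from by
        rw [show 1 + skipStr rest = skipStr rest + 1 from by omega]; simp]
      rw [show List.take (1 + skipStr rest) (c :: rest) = c :: List.take (skipStr rest) rest from by
        rw [show 1 + skipStr rest = skipStr rest + 1 from by omega]; simp]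
      simp

-- main invariant of A's loop in the out-of-string state
lemma tokAgo_split : ∀ (n : Nat) (cs : List Char), cs.length ≤ n →
    ∀ (cur : List Char) (vals : List String),
      tokAgo cs cur false vals = vals ++ render (mergeHead cur (splitTop cs)) := by
  intro n
  induction n with
  | zero =>
      intro cs hn cur vals
      have : cs = [] := by cases cs <;> simp_all
      subst this
      rw [splitTop_none (by simp [findCut])]
      by_cases h : cur = [] <;> simp [tokAgo, mergeHead, render, h]
  | succ n ih =>
      intro cs hn cur vals
      cases cs with
      | nil =>
          rw [splitTop_none (by simp [findCut])]
          by_cases h : cur = [] <;> simp [tokAgo, mergeHead, render, h]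
      | cons ch rest =>
          by_cases hq : ch = '\''
          · subst hq
            rw [show tokAgo ('\'' :: rest) cur false vals
                  = tokAgo rest (cur ++ ['\'']) true vals from by simp [tokAgo]]
            rw [tokAgo_inStr]
            rw [ih (rest.drop (skipStr rest)) (by simp at hn ⊢; omega)]
            rw [splitTop_quote, mergeHead_mergeHead]
            simp
          · by_cases hc : ch = ','
            · subst hc
              rw [show tokAgo (',' :: rest) cur false vals
                    = tokAgo rest [] false (vals ++ [String.ofList cur]) from by simp [tokAgo]]
              rw [ih rest (by simp at hn; omega)]
              rw [splitTop_comma]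
              rw [show mergeHead cur ([] :: splitTop rest) = cur :: splitTop rest from by
                    simp [mergeHead]]
              rw [mergeHead_nil (splitTop_ne_nil rest),
                  render_cons cur (splitTop_ne_nil rest)]
              simp
            · rw [show tokAgo (ch :: rest) cur false vals
                    = tokAgo rest (cur ++ [ch]) false vals from by simp [tokAgo, hq, hc]]
              rw [ih rest (by simp at hn; omega)]
              rw [splitTop_other rest hc hq, mergeHead_mergeHead]

-- ===== VERDICT (by name: the statement is the Claim_ definition above) =====
theorem tokenize_row_py_spec : Claim_equal_tokenize_row_py := by
  intro s _
  show tokenize_row_py s = tokenize_row_py_alt s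
  rw [tokenize_row_py, tokAgo_split s.toList.length s.toList le_rfl,
      mergeHead_nil (splitTop_ne_nil s.toList)]
  simp [tokenize_row_py_alt, render]
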